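-- pv_equiv track=rewrite | github.com/jiajunma/unipotentrepn | standalone.py | _countPBP_D
-- ===== SOURCE A (Python) =====
-- def _countPBP_D(dpart):
--     """
--     Count PBPs for type D using Proposition 10.11 of [BMSZb].
--     Ǒ has all odd rows, total even.
--
--     Returns (DD, RC, SS) triple:
--       DD = count of PBPs with tail symbol d
--       RC = count of PBPs with tail symbol in {c, r}
--       SS = count of PBPs with tail symbol s
--
--     Total = DD + RC + SS.
--     """
--     if len(dpart) == 0:
--         return (1, 0, 0)  # base case: f^{d}=1, f^{c,r}=0, f^{s}=0
--
--     R1 = dpart[0]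
--     R2 = dpart[1] if len(dpart) > 1 else 0
--     R3 = dpart[2] if len(dpart) > 2 else -1
--     k = (R1 - R2) // 2 + 1  # k from Proposition 10.11
--
--     # Tail polynomials for D,[2k-1,1]_row (evaluated at p=q=1: r=s=c=d=1)
--     # ν_k at (1,1) = k+1
--     def nu(n):
--         return n + 1 if n >= 0 else 0
--
--     TDD = nu(k - 1) * 1 + nu(k - 2) * 1  # ν_{k-1}·d + ν_{k-2}·cd
--     TRC = nu(k - 1) * 1 + 1 * nu(k - 1)  # ν_{k-1}·c + r·ν_{k-1}
--     TSS = 1  # s^k = 1 at p=q=1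
--
--     if R2 > R3:
--         # (2,3) is primitive: Prop 10.11(a)
--         C2 = R2 - 1
--         DDp, RCp, SSp = _countPBP_D(dpart[2:])
--         resp = 1 * (DDp + RCp + SSp)  # (pq)^{c₁} at (1,1) = 1
--         return (resp * TDD, resp * TRC, resp * TSS)
--     else:
--         # (2,3) is balanced: Prop 10.11(b)
--         scDD = nu(k - 2) * 1 + 1 * nu(k - 2) * 1  # ν_{k-2}·cd + s·ν_{k-2}·d
--         scRC = nu(k - 1) * 1 + 1 * nu(k - 2) * 1  # ν_{k-1}·c + s·ν_{k-2}·r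
--         scSS = 1  # s^k
--
--         DDp, RCp, SSp = _countPBP_D(dpart[2:])
--         DD = DDp * TDD + RCp * scDD
--         RC = DDp * TRC + RCp * scRC
--         SS = DDp * TSS + RCp * scSS
--         return (DD, RC, SS)
-- ===== SOURCE B (Python) =====
-- def _countPBP_D(dpart):
--     """Iterative back-to-front recurrence: walks the row indices 0,2,4,... in
--     reverse with plain index arithmetic, so no list is ever sliced/copied."""
--     n = len(dpart)
--     DD, RC, SS = 1, 0, 0
--     start = n - 1 if n % 2 == 1 else n - 2
--     for i in range(start, -1, -2):
--         R1 = dpart[i]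
--         R2 = dpart[i + 1] if i + 1 < n else 0
--         R3 = dpart[i + 2] if i + 2 < n else -1
--         k = (R1 - R2) // 2 + 1
--         nu1 = k if k >= 1 else 0          # nu(k-1)
--         nu2 = k - 1 if k >= 2 else 0      # nu(k-2)
--         TDD = nu1 + nu2
--         TRC = 2 * nu1
--         if R2 > R3:
--             resp = DD + RC + SS
--             DD, RC, SS = resp * TDD, resp * TRC, resp
--         else:
--             DD, RC, SS = DD * TDD + RC * 2 * nu2, DD * TRC + RC * (nu1 + nu2), DD + RC
--     return (DD, RC, SS)
-- ===== Notes on version B (the rewrite author's own statement) =====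
-- stated objective: faster
-- what changed: Replaced the recursion that slices dpart[2:] at every level (copying the tail each call) by a single iterative loop over indices start, start-2, ..., 0 that updates the (DD, RC, SS) triple in place with plain index arithmetic.
import Mathlib
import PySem

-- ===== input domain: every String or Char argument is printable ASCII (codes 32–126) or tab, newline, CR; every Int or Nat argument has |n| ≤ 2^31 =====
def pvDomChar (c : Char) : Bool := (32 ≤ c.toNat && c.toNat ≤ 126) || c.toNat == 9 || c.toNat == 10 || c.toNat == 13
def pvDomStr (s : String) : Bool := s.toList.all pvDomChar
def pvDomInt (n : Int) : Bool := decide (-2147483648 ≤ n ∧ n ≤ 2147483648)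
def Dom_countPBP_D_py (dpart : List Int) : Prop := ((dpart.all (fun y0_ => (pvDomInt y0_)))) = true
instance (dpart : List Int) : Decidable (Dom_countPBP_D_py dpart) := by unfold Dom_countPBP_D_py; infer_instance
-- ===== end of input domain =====

-- B replaces A's tail-slicing recursion with one iterative index loop over the same row chunks; objective: faster (no slice copies).


-- ===== PORT A =====
-- A's local helper `nu`
def pvNu (n : Int) : Int := if n ≥ 0 then n + 1 else 0

-- A's recursion, returning the (DD, RC, SS) tuple; recursive call is on dpart[2:] (= rest.drop 1)
def countPBP_D_core : List Int → Int × Int × Int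
  | [] => (1, 0, 0)
  | R1 :: rest =>
    let R2 : Int := match rest with | [] => 0 | x :: _ => x
    let R3 : Int := match rest with | _ :: y :: _ => y | _ => -1
    let k : Int := PySem.Int.floordiv (R1 - R2) 2 + 1
    let TDD := pvNu (k - 1) * 1 + pvNu (k - 2) * 1
    let TRC := pvNu (k - 1) * 1 + 1 * pvNu (k - 1)
    let TSS : Int := 1
    if R2 > R3 then
      let p := countPBP_D_core (rest.drop 1)
      let resp := 1 * (p.1 + p.2.1 + p.2.2)
      (resp * TDD, resp * TRC, resp * TSS)
    else
      let scDD := pvNu (k - 2) * 1 + 1 * pvNu (k - 2) * 1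
      let scRC := pvNu (k - 1) * 1 + 1 * pvNu (k - 2) * 1
      let scSS : Int := 1
      let p := countPBP_D_core (rest.drop 1)
      (p.1 * TDD + p.2.1 * scDD, p.1 * TRC + p.2.1 * scRC, p.1 * TSS + p.2.1 * scSS)
  termination_by l => l.length
  decreasing_by all_goals (rw [List.length_drop, List.length_cons]; omega)

-- the Python tuple as the required List Int
def countPBP_D_py (dpart : List Int) : List Int :=
  let p := countPBP_D_core dpart
  [p.1, p.2.1, p.2.2]

-- ===== PORT B =====
-- B's loop body at index i (one chunk of the recurrence)
def pvBStep (dpart : List Int) (st : Int × Int × Int) (i : Int) : Int × Int × Int :=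
  let n : Int := dpart.length
  let R1 := PySem.List.pyGetD dpart i 0
  let R2 := if i + 1 < n then PySem.List.pyGetD dpart (i + 1) 0 else 0
  let R3 := if i + 2 < n then PySem.List.pyGetD dpart (i + 2) 0 else -1
  let k : Int := PySem.Int.floordiv (R1 - R2) 2 + 1
  let nu1 := if k ≥ 1 then k else 0
  let nu2 := if k ≥ 2 then k - 1 else 0
  let TDD := nu1 + nu2
  let TRC := 2 * nu1
  if R2 > R3 then
    let resp := st.1 + st.2.1 + st.2.2
    (resp * TDD, resp * TRC, resp)
  else
    (st.1 * TDD + st.2.1 * 2 * nu2, st.1 * TRC + st.2.1 * (nu1 + nu2), st.1 + st.2.1)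

def countPBP_D_altcore (dpart : List Int) : Int × Int × Int :=
  let n : Int := dpart.length
  let start : Int := if PySem.Int.mod n 2 = 1 then n - 1 else n - 2
  (PySem.List.pyRange start (-1) (-2)).foldl (pvBStep dpart) (1, 0, 0)

def countPBP_D_py_alt (dpart : List Int) : List Int :=
  let p := countPBP_D_altcore dpart
  [p.1, p.2.1, p.2.2]

-- ===== PRECONDITION & SPEC =====
def Spec_countPBP_D_py (dpart : List Int) (out : List Int) : Prop := out = countPBP_D_py_alt dpart
instance (dpart : List Int) (out : List Int) : Decidable (Spec_countPBP_D_py dpart out) := by unfold Spec_countPBP_D_py; infer_instance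

-- ===== CLAIM (what is proved, stated in full; the proofs are below) =====
def Claim_equal_countPBP_D_py : Prop := ∀ (dpart : List Int), Dom_countPBP_D_py dpart → Spec_countPBP_D_py dpart (countPBP_D_py dpart)

-- ===== LEMMAS AND PROOFS =====

theorem pvRange_even (m : Nat) :
    PySem.List.pyRange (2 * (m : Int)) (-1) (-2)
      = (List.range (m + 1)).map (fun k : Nat => 2 * (m : Int) - 2 * (k : Int)) := by
  unfold PySem.List.pyRange
  norm_num
  have h1 : (-1 : Int) < 2 * m := by omega
  rw [if_pos h1]
  have h2 : ((2 * (m:Int) + 1 + 2 - 1) / 2).toNat = m + 1 := by omega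
  rw [h2]
  simp [sub_eq_add_neg]

theorem pvRange_decomp (c : Nat) :
    PySem.List.pyRange (2 * (c : Int)) (-1) (-2)
      = ((PySem.List.pyRange (2 * (c : Int) - 2) (-1) (-2)).map (· + 2)) ++ [0] := by
  cases c with
  | zero => decide
  | succ k =>
    have e : 2 * ((k + 1 : Nat) : Int) - 2 = 2 * (k : Int) := by push_cast; ring
    rw [e, pvRange_even, pvRange_even, List.map_map, List.range_succ, List.map_append]
    congr 1
    · apply List.map_congr_left
      intro j _
      simp
      ring
    · simp

theorem pvRange_nonneg (c : Nat) (x : Int)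
    (hx : x ∈ PySem.List.pyRange (2 * (c : Int) - 2) (-1) (-2)) : 0 ≤ x := by
  cases c with
  | zero => simp [PySem.List.pyRange] at hx
  | succ k =>
    have e : 2 * ((k + 1 : Nat) : Int) - 2 = 2 * (k : Int) := by push_cast; ring
    rw [e, pvRange_even] at hx
    simp at hx
    obtain ⟨j, hj, rfl⟩ := hx
    omega
theorem pvGetD_shift2 (a b : Int) (l : List Int) (j : Int) (hj : 0 ≤ j) :
    PySem.List.pyGetD (a :: b :: l) (j + 2) 0 = PySem.List.pyGetD l j 0 := by
  rw [show j + 2 = ((j.toNat + 2 : Nat) : Int) by omega, PySem.List.pyGetD_natCast,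
      show j = ((j.toNat : Nat) : Int) by omega, PySem.List.pyGetD_natCast]
  rfl

theorem pvBStep_shift (a b : Int) (r : List Int) (st : Int × Int × Int) (j : Int)
    (hj : 0 ≤ j) : pvBStep (a :: b :: r) st (j + 2) = pvBStep r st j := by
  unfold pvBStep
  simp only [List.length_cons]
  push_cast
  rw [pvGetD_shift2 a b r j hj,
      show j + 2 + 1 = (j + 1) + 2 from by ring,
      pvGetD_shift2 a b r (j+1) (by omega),
      pvGetD_shift2 a b r (j+2) (by omega)]
  have c2 : ((j+1)+2 < (r.length:Int)+1+1) ↔ (j+1 < (r.length:Int)) := by omega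
  have c3 : (j+2+2 < (r.length:Int)+1+1) ↔ (j+2 < (r.length:Int)) := by omega
  simp only [c2, c3]
theorem pvBStep_zero (a b : Int) (r : List Int) :
    pvBStep (a :: b :: r) (countPBP_D_core r) 0 = countPBP_D_core (a :: b :: r) := by
  cases r with
  | nil =>
    simp only [countPBP_D_core, pvBStep, pvNu]
    norm_num
    have hb : PySem.List.pyGetD [a, b] 1 0 = b := by
      rw [show (1:Int) = ((1:Nat):Int) from rfl, PySem.List.pyGetD_natCast]; rfl
    simp only [hb, show countPBP_D_core ([]:List Int) = (1,0,0) from by rw [countPBP_D_core]]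
    split_ifs <;>
      first
        | (exfalso; omega)
        | (refine Prod.ext ?_ (Prod.ext ?_ ?_) <;> ring)
  | cons y r' =>
    simp only [countPBP_D_core, pvBStep, pvNu]
    norm_num
    have hb : PySem.List.pyGetD (a :: b :: y :: r') 1 0 = b := by
      rw [show (1:Int) = ((1:Nat):Int) from rfl, PySem.List.pyGetD_natCast]; rfl
    have hy : PySem.List.pyGetD (a :: b :: y :: r') 2 0 = y := by
      rw [show (2:Int) = ((2:Nat):Int) from rfl, PySem.List.pyGetD_natCast]; rfl
    simp only [hb, hy]
    split_ifs <;>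
      first
        | (exfalso; omega)
        | (refine Prod.ext ?_ (Prod.ext ?_ ?_) <;> ring)
theorem pvStart_eq (m : Nat) :
    (if PySem.Int.mod ((m : Int)) 2 = 1 then (m : Int) - 1 else (m : Int) - 2)
      = 2 * (((m + 1) / 2 : Nat) : Int) - 2 := by
  rw [PySem.Int.mod_eq_emod_of_pos (by norm_num)]
  split_ifs with h <;> omega

theorem pvMain : ∀ (l : List Int), countPBP_D_altcore l = countPBP_D_core l
  | [] => by rw [countPBP_D_core]; decide
  | [a] => by
    unfold countPBP_D_altcore
    simp only [List.length_cons, List.length_nil]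
    rw [show ((0 + 1 : Nat) : Int) = ((1 : Nat) : Int) from by norm_num, pvStart_eq 1]
    rw [show 2 * (((1 + 1) / 2 : Nat) : Int) - 2 = 0 from by norm_num]
    rw [show PySem.List.pyRange 0 (-1) (-2) = [0] from by decide]
    simp only [List.foldl_cons, List.foldl_nil]
    simp only [countPBP_D_core, pvBStep, pvNu]
    norm_num
    simp only [show countPBP_D_core ([]:List Int) = (1,0,0) from by rw [countPBP_D_core]]
    split_ifs <;>
      first
        | (exfalso; omega)
        | (refine ⟨?_, ?_, ?_⟩ <;> ring)
  | a :: b :: r => by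
    have IH := pvMain r
    unfold countPBP_D_altcore at IH ⊢
    simp only [List.length_cons] at IH ⊢
    rw [pvStart_eq (r.length + 1 + 1)] 
    rw [pvStart_eq r.length] at IH
    rw [show 2 * (((r.length + 1 + 1 + 1) / 2 : Nat) : Int) - 2
          = 2 * ((((r.length + 1) / 2 : Nat)) : Int) from by push_cast [Nat.add_div_right]; ring_nf; omega]
    rw [pvRange_decomp ((r.length + 1) / 2)]
    rw [List.foldl_append]
    simp only [List.foldl_cons, List.foldl_nil]
    rw [List.foldl_map]
    have hfold : List.foldl (fun (x : Int × Int × Int) (y : Int) => pvBStep (a :: b :: r) x (y + 2))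
            ((1 : Int), (0 : Int), (0 : Int))
            (PySem.List.pyRange (2 * (((r.length + 1) / 2 : Nat) : Int) - 2) (-1) (-2))
          = List.foldl (pvBStep r) ((1 : Int), (0 : Int), (0 : Int))
            (PySem.List.pyRange (2 * (((r.length + 1) / 2 : Nat) : Int) - 2) (-1) (-2)) :=
      PySem.List.foldl_congr_mem _ _ _ _
        (fun acc x hx => pvBStep_shift a b r acc x (pvRange_nonneg ((r.length + 1) / 2) x hx))
    rw [hfold, IH]
    exact pvBStep_zero a b r
  termination_by l => l.length
  decreasing_by all_goals (simp only [List.length_cons]; omega)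

-- ===== VERDICT (by name: the statement is the Claim_ definition above) =====
theorem countPBP_D_py_spec : Claim_equal_countPBP_D_py := by
  intro dpart _
  unfold Spec_countPBP_D_py countPBP_D_py countPBP_D_py_alt
  rw [pvMain]
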